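-- pv_equiv track=rewrite | github.com/ppg003/lintcode-algo | 39.py | recoverRotatedSortedArray
-- ===== SOURCE A (Python) =====
-- def recoverRotatedSortedArray(nums):
--     length = len(nums)
--     if length in (0, 1):
--         return nums
--
--     index = 0
--
--     for i in range(1, length):
--         if nums[i] < nums[i - 1]:
--             index = i
--             break
--
--     if index != 0:
--         nums.extend(nums[:i])
--         for j in range(index):
--             del nums[0]
--     return nums
-- ===== SOURCE B (Python) =====
-- def _reverse_segment(nums, lo, hi):
--     # reverses nums[lo..hi] in place with two-pointer swaps
--     while lo < hi:
--         nums[lo], nums[hi] = nums[hi], nums[lo]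
--         lo += 1
--         hi -= 1
--
--
-- def recoverRotatedSortedArray(nums):
--     n = len(nums)
--     index = 0
--     for i in range(1, n):
--         if nums[i] < nums[i - 1]:
--             index = i
--             break
--     if index:
--         _reverse_segment(nums, 0, index - 1)
--         _reverse_segment(nums, index, n - 1)
--         _reverse_segment(nums, 0, n - 1)
--     return nums
-- ===== Notes on version B (the rewrite author's own statement) =====
-- stated objective: alternative
-- what changed: B keeps the linear pivot scan but recovers the order with the classic in-place three-reversal rotation (two-pointer segment swaps) instead of A's slice-extend plus repeated deletion of the head.
import Mathlib
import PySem

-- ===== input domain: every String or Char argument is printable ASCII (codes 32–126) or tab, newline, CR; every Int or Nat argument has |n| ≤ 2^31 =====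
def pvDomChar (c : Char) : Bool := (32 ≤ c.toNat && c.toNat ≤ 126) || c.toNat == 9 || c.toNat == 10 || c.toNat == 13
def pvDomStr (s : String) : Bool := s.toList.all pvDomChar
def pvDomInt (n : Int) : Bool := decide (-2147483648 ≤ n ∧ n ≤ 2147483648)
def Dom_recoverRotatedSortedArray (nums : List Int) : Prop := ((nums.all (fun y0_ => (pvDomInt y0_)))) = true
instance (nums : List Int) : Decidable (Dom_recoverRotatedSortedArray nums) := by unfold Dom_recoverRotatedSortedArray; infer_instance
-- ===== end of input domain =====

-- B replaces A's slice-extend + repeated head deletion by the in-place three-reversal rotation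
-- (alternative decomposition; same return value). Both Pythons mutate `nums` to the same final
-- state and return it, so the list/return equivalence proved here covers the mutation too.

-- ===== PORT A =====
-- Python's `for i in range(1, length)` with a break: returns (index, i) — index as set by the
-- loop (0 if no break), and the last value of i (length-1 when the loop exhausts).
-- All indices are in range, so `getD _ 0` is exact for nums[i] / nums[i-1].
def pivotA (nums : List Int) (i : Nat) : Nat × Nat :=
  if i < nums.length then
    if nums.getD i 0 < nums.getD (i - 1) 0 then (i, i)
    else pivotA nums (i + 1)
  else (0, nums.length - 1)
termination_by nums.length - i

-- `for j in range(index): del nums[0]`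
def delLoop (xs : List Int) : Nat → List Int
  | 0 => xs
  | n + 1 => delLoop (xs.drop 1) n

def recoverRotatedSortedArray (nums : List Int) : List Int :=
  let length := nums.length
  if length = 0 ∨ length = 1 then nums
  else
    let p := pivotA nums 1
    if p.1 ≠ 0 then delLoop (nums ++ nums.take p.2) p.1
    else nums

-- ===== PORT B =====
-- `while lo < hi: swap nums[lo], nums[hi]; lo += 1; hi -= 1` (in-range indices, getD exact)
def reverseSegment (nums : List Int) (lo hi : Nat) : List Int :=
  if lo < hi then
    reverseSegment ((nums.set lo (nums.getD hi 0)).set hi (nums.getD lo 0)) (lo + 1) (hi - 1)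
  else nums
termination_by hi - lo
decreasing_by omega

-- B's pivot scan: first i in [1, n) with nums[i] < nums[i-1], else 0
def pivotB (nums : List Int) (i : Nat) : Nat :=
  if i < nums.length then
    if nums.getD i 0 < nums.getD (i - 1) 0 then i
    else pivotB nums (i + 1)
  else 0
termination_by nums.length - i

def recoverRotatedSortedArray_alt (nums : List Int) : List Int :=
  let n := nums.length
  let index := pivotB nums 1
  if index ≠ 0 then
    reverseSegment (reverseSegment (reverseSegment nums 0 (index - 1)) index (n - 1)) 0 (n - 1)
  else nums

-- ===== PRECONDITION & SPEC =====
def Spec_recoverRotatedSortedArray (nums : List Int) (out : List Int) : Prop := out = recoverRotatedSortedArray_alt nums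
instance (nums : List Int) (out : List Int) : Decidable (Spec_recoverRotatedSortedArray nums out) := by unfold Spec_recoverRotatedSortedArray; infer_instance

-- ===== CLAIM =====
def Claim_equal_recoverRotatedSortedArray : Prop := ∀ (nums : List Int), Dom_recoverRotatedSortedArray nums → Spec_recoverRotatedSortedArray nums (recoverRotatedSortedArray nums)

-- ===== LEMMAS AND PROOFS =====

theorem getD_set (l : List Int) (i n : Nat) (a : Int) :
    (l.set i a).getD n 0 = if i = n ∧ i < l.length then a else l.getD n 0 := by
  simp [List.getD_eq_getElem?_getD, List.getElem?_set]
  split_ifs <;> simp_all <;> omega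

theorem pivotA_fst_eq_pivotB (nums : List Int) (i : Nat) :
    (pivotA nums i).1 = pivotB nums i := by
  fun_induction pivotA nums i <;> unfold pivotB <;> simp_all

theorem pivotA_snd (nums : List Int) (i : Nat) (h : (pivotA nums i).1 ≠ 0) :
    (pivotA nums i).2 = (pivotA nums i).1 := by
  fun_induction pivotA nums i <;> simp_all

theorem pivotB_bounds (nums : List Int) (i : Nat) (h : pivotB nums i ≠ 0) :
    i ≤ pivotB nums i ∧ pivotB nums i < nums.length := by
  fun_induction pivotB nums i <;> simp_all <;> omega

theorem delLoop_eq_drop (xs : List Int) (n : Nat) : delLoop xs n = xs.drop n := by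
  induction n generalizing xs with
  | zero => simp [delLoop]
  | succ m ih => simp [delLoop, ih]

theorem reverseSegment_length (nums : List Int) (lo hi : Nat) :
    (reverseSegment nums lo hi).length = nums.length := by
  fun_induction reverseSegment nums lo hi <;> simp_all

theorem reverseSegment_getD (nums : List Int) (lo hi : Nat)
    (hhi : hi < nums.length) (i : Nat) :
    (reverseSegment nums lo hi).getD i 0 =
      if lo ≤ i ∧ i ≤ hi then nums.getD (lo + hi - i) 0 else nums.getD i 0 := by
  fun_induction reverseSegment nums lo hi with
  | case1 nums lo hi hlt ih =>
    rw [ih (by simpa using by omega)]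
    simp only [getD_set, List.length_set]
    split_ifs <;> first | rfl | (congr 1; omega)
  | case2 nums lo hi hlt =>
    split_ifs with h
    · have : lo + hi - i = i := by omega
      rw [this]
    · rfl

theorem rot_getElem (nums : List Int) (lo hi : Nat) (hhi : hi < nums.length) (hlo : lo ≤ hi + 1)
    (n : Nat) (h2 : n < nums.length) :
    (nums.take lo ++ ((nums.drop lo).take (hi + 1 - lo)).reverse ++ nums.drop (hi + 1))[n]'(by simp; omega) =
      if lo ≤ n ∧ n ≤ hi then nums.getD (lo + hi - n) 0 else nums.getD n 0 := by
  simp only [List.getElem_append, List.getElem_take, List.getElem_reverse,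
    List.getElem_drop, List.length_take, List.length_reverse, List.length_drop,
    List.length_append, Nat.min_def]
  split_ifs <;>
    first
      | (rw [if_pos (by omega : lo ≤ n ∧ n ≤ hi), List.getD_eq_getElem _ _ (by omega)];
         try exact getElem_congr_idx (by omega))
      | (rw [if_neg (by omega : ¬(lo ≤ n ∧ n ≤ hi)), List.getD_eq_getElem _ _ (by omega)];
         try exact getElem_congr_idx (by omega))

theorem reverseSegment_eq (nums : List Int) (lo hi : Nat)
    (hhi : hi < nums.length) (hlo : lo ≤ hi + 1) :
    reverseSegment nums lo hi =
      nums.take lo ++ ((nums.drop lo).take (hi + 1 - lo)).reverse ++ nums.drop (hi + 1) := by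
  apply List.ext_getElem
  · rw [reverseSegment_length]; simp; omega
  · intro n h1 h2
    have hn : n < nums.length := by rwa [reverseSegment_length] at h1
    calc (reverseSegment nums lo hi)[n]'h1
        = (reverseSegment nums lo hi).getD n 0 := (List.getD_eq_getElem _ _ h1).symm
      _ = if lo ≤ n ∧ n ≤ hi then nums.getD (lo + hi - n) 0 else nums.getD n 0 :=
          reverseSegment_getD nums lo hi hhi n
      _ = _ := (rot_getElem nums lo hi hhi hlo n hn).symm

-- ===== VERDICT =====
theorem recoverRotatedSortedArray_spec : Claim_equal_recoverRotatedSortedArray := by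
  unfold Claim_equal_recoverRotatedSortedArray
  intro nums _
  unfold Spec_recoverRotatedSortedArray
  show recoverRotatedSortedArray nums = recoverRotatedSortedArray_alt nums
  unfold recoverRotatedSortedArray recoverRotatedSortedArray_alt
  by_cases hlen : nums.length = 0 ∨ nums.length = 1
  · have hB : pivotB nums 1 = 0 := by unfold pivotB; rw [if_neg (by omega)]
    have hA : (pivotA nums 1).1 = 0 := by rw [pivotA_fst_eq_pivotB, hB]
    simp only [hB, hA, if_pos hlen]
    simp
  · have h2 : 2 ≤ nums.length := by omega
    rw [if_neg hlen]
    have hfst : (pivotA nums 1).1 = pivotB nums 1 := pivotA_fst_eq_pivotB nums 1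
    by_cases hk0 : pivotB nums 1 = 0
    · simp [hfst, hk0]
    · have hb := pivotB_bounds nums 1 hk0
      have hsnd : (pivotA nums 1).2 = pivotB nums 1 := by
        rw [pivotA_snd nums 1 (by rw [hfst]; exact hk0), hfst]
      set k := pivotB nums 1 with hk
      simp only [hfst, hsnd, if_pos hk0]
      -- A's side: drop k (nums ++ take k nums) = drop k nums ++ take k nums
      rw [delLoop_eq_drop, List.drop_append_of_le_length (by omega)]
      -- B's side: three reversals
      have hb1 : 1 ≤ k := hb.1
      have hb2 : k < nums.length := hb.2
      have e1 : reverseSegment nums 0 (k - 1) = (nums.take k).reverse ++ nums.drop k := by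
        rw [reverseSegment_eq nums 0 (k - 1) (by omega) (by omega)]
        have : k - 1 + 1 = k := by omega
        simp [this]
      have hlen1 : ((nums.take k).reverse ++ nums.drop k).length = nums.length := by
        simp; omega
      have e2 : reverseSegment ((nums.take k).reverse ++ nums.drop k) k (nums.length - 1) =
          (nums.take k).reverse ++ (nums.drop k).reverse := by
        rw [reverseSegment_eq _ k (nums.length - 1) (by rw [hlen1]; omega) (by omega)]
        have h1 : nums.length - 1 + 1 = nums.length := by omega
        rw [h1]
        rw [List.take_append_of_le_length (by simp; omega)]
        rw [List.drop_append_of_le_length (by simp; omega)]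
        rw [List.take_of_length_le (le_of_eq (by simp; omega))]
        rw [List.drop_of_length_le (le_of_eq hlen1)]
        have hd0 : List.drop k (List.take k nums).reverse = [] :=
          List.drop_of_length_le (by simp)
        rw [hd0, List.nil_append]
        have ht3 : (List.drop k nums).length ≤ nums.length - k := by simp
        rw [List.take_of_length_le ht3]
        simp
      have hlen2 : ((nums.take k).reverse ++ (nums.drop k).reverse).length = nums.length := by
        simp; omega
      have e3 : reverseSegment ((nums.take k).reverse ++ (nums.drop k).reverse) 0 (nums.length - 1) =
          nums.drop k ++ nums.take k := by
        rw [reverseSegment_eq _ 0 (nums.length - 1) (by rw [hlen2]; omega) (by omega)]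
        have h1 : nums.length - 1 + 1 = nums.length := by omega
        rw [h1]
        simp only [List.take_zero, List.drop_zero, List.nil_append, Nat.sub_zero]
        rw [List.take_of_length_le (le_of_eq hlen2), List.drop_of_length_le (le_of_eq hlen2)]
        simp [List.reverse_append]
      rw [e1, e2, e3]
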